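-- pv_equiv track=rewrite | github.com/gregconner/triangular-number-analysis | TriangularSquareDiff_v0.1.2.py | is_triangular_of_square_of_triangular
-- ===== SOURCE A (Python) =====
-- def triangular_number(n):
--     """Calculate the nth triangular number: T_n = n(n+1)/2"""
--     return n * (n + 1) // 2
--
-- def is_triangular_of_square_of_triangular(x):
--     """
--     Check if a number is the triangular number of the square of a triangular number.
--     This means x = T_(T_n²) for some n.
--     Returns (is_triangular_of_square_of_triangular, n) where n is the triangular number index.
--     """
--     # We need to find n such that x = T_(T_n²)
--     # This means x = T_n² * (T_n² + 1) / 2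
--
--     # Try different values of n
--     max_n = 20  # Reasonable upper bound since T_n² grows quickly
--
--     for n in range(1, max_n + 1):
--         T_n = triangular_number(n)
--         T_n_squared = T_n * T_n
--         T_of_T_n_squared = triangular_number(T_n_squared)
--
--         if T_of_T_n_squared == x:
--             return True, n
--         elif T_of_T_n_squared > x:
--             break  # No point continuing if we've exceeded x
--
--     return False, 0
-- ===== SOURCE B (Python) =====
-- def _tri(n):
--     return n * (n + 1) // 2
--
-- # A caps its search at n = 20, so the full answer table is tiny; precompute it once.
-- _TABLE = {_tri(_tri(n) ** 2): n for n in range(1, 21)}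
--
-- def is_triangular_of_square_of_triangular(x):
--     n = _TABLE.get(x)
--     return (False, 0) if n is None else (True, n)
-- ===== Notes on version B (the rewrite author's own statement) =====
-- stated objective: idiomatic
-- what changed: Replaces the linear scan with early break over n=1..20 by a module-level precomputed dict mapping T(T_n^2) to n, so each call is a single dict lookup.
import Mathlib
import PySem

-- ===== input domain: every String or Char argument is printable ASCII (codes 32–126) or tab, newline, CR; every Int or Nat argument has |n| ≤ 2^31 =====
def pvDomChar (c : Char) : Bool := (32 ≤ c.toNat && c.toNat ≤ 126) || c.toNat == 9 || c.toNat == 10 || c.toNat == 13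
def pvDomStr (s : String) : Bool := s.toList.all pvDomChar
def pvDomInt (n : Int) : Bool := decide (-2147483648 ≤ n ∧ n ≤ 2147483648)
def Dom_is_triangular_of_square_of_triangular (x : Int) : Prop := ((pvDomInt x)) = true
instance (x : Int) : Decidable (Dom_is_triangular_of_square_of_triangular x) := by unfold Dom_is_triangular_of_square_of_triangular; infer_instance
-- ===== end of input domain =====

-- B replaces A's linear scan (with early break) over n = 1..20 by a precomputed
-- table from T(T_n^2) to n, looked up once per call (objective: idiomatic table lookup instead of a scan).


-- ===== PORT A =====
def triangular_number (n : Int) : Int := PySem.Int.floordiv (n * (n + 1)) 2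

-- the 'for n in range(1, max_n + 1)' loop, with its early 'break'
def pvLoopA : List Int → Int → Bool × Int
  | [], _ => (false, 0)
  | n :: ns, x =>
    let T_n := triangular_number n
    let T_n_squared := T_n * T_n
    let T_of_T_n_squared := triangular_number T_n_squared
    if T_of_T_n_squared = x then (true, n)
    else if T_of_T_n_squared > x then (false, 0)
    else pvLoopA ns x

def is_triangular_of_square_of_triangular (x : Int) : Bool × Int :=
  pvLoopA (PySem.List.pyRange 1 21 1) x

-- ===== PORT B =====
def pvTriB (n : Int) : Int := PySem.Int.floordiv (n * (n + 1)) 2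

-- _TABLE = {_tri(_tri(n) ** 2): n for n in range(1, 21)}
def pvTable : PySem.Dict Int Int :=
  (PySem.List.pyRange 1 21 1).foldl
    (fun d n => d.insert (pvTriB ((pvTriB n) ^ 2)) n) PySem.Dict.empty

def is_triangular_of_square_of_triangular_alt (x : Int) : Bool × Int :=
  match pvTable.get? x with
  | none => (false, 0)
  | some n => (true, n)

-- ===== PRECONDITION & SPEC =====
def Spec_is_triangular_of_square_of_triangular (x : Int) (out : Bool × Int) : Prop := out = is_triangular_of_square_of_triangular_alt x
instance (x : Int) (out : Bool × Int) : Decidable (Spec_is_triangular_of_square_of_triangular x out) := by unfold Spec_is_triangular_of_square_of_triangular; infer_instance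

-- ===== CLAIM (what is proved, stated in full; the proofs are below) =====
def Claim_equal_is_triangular_of_square_of_triangular : Prop := ∀ (x : Int), Dom_is_triangular_of_square_of_triangular x → Spec_is_triangular_of_square_of_triangular x (is_triangular_of_square_of_triangular x)

-- ===== LEMMAS AND PROOFS =====

def pvKeys : List Int :=
  [1, 45, 666, 5050, 25425, 97461, 307720, 840456, 2051325, 4576825, 9489546,
   18510570, 34291621, 60780825, 103687200, 171060256, 274002345, 427532661,
   651623050, 972427050]

theorem pvTable_keys : pvTable.keys = pvKeys := by decide

-- A's loop returns (false, 0) when no visited value equals x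
theorem pvLoopA_none (l : List Int) (x : Int)
    (h : ∀ n ∈ l, triangular_number (triangular_number n * triangular_number n) ≠ x) :
    pvLoopA l x = (false, 0) := by
  induction l with
  | nil => rfl
  | cons n ns ih =>
    simp only [pvLoopA]
    have hn := h n (List.mem_cons_self ..)
    rw [if_neg hn]
    split_ifs with hgt
    · rfl
    · exact ih (fun m hm => h m (List.mem_cons_of_mem _ hm))

theorem pvValues_eq :
    (PySem.List.pyRange 1 21 1).map
      (fun n => triangular_number (triangular_number n * triangular_number n)) = pvKeys := by
  decide

-- ===== VERDICT (by name: the statement is the Claim_ definition above) =====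
theorem is_triangular_of_square_of_triangular_spec : Claim_equal_is_triangular_of_square_of_triangular := by
  intro x _
  show is_triangular_of_square_of_triangular x = is_triangular_of_square_of_triangular_alt x
  by_cases hx : x ∈ pvKeys
  · -- x is one of the 20 table keys: both sides evaluate
    simp only [pvKeys, List.mem_cons, List.not_mem_nil, or_false] at hx
    rcases hx with h|h|h|h|h|h|h|h|h|h|h|h|h|h|h|h|h|h|h|h <;> subst h <;> decide
  · -- x is not a key: A's loop never matches, B's lookup misses
    have hA : is_triangular_of_square_of_triangular x = (false, 0) := by
      apply pvLoopA_none
      intro n hn hcontra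
      apply hx
      rw [← pvValues_eq]
      exact hcontra ▸ List.mem_map_of_mem hn
    have hB : pvTable.get? x = none := by
      rw [PySem.Dict.get?_eq_none_iff_not_mem_keys, pvTable_keys]
      exact hx
    rw [hA, is_triangular_of_square_of_triangular_alt, hB]
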